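-- pv_equiv track=rewrite | github.com/miliar/Code_Jam_Webscraper | solutions_python/Problem_149/52.py | solve
-- ===== SOURCE A (Python) =====
-- ir = range
--
-- def solve(N,A):
-- 	ans = 0
-- 	#if case == 12: import pdb;pdb.set_trace()
-- 	while A:
-- 		N = len(A)
-- 		L = list(ir(N))
-- 		x = min(L, key= lambda n:A[n])
-- 		if x == 0 or x == N-1:
-- 			A = A[:x]+ A[x+1:]
-- 			continue
--
-- 		a = min(N - x - 1, x)
-- 		ans += a
-- 		A = A[:x]+ A[x+1:]
-- 	return ans
-- ===== SOURCE B (Python) =====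
-- def solve(N, A):
--     n = len(A)
--     order = sorted(range(n), key=lambda i: (A[i], i))
--     rem = list(range(n))
--     ans = 0
--     for i in order:
--         lo, hi = 0, len(rem)
--         while lo < hi:
--             mid = (lo + hi) // 2
--             if rem[mid] < i:
--                 lo = mid + 1
--             else:
--                 hi = mid
--         ans += min(lo, len(rem) - 1 - lo)
--         rem.pop(lo)
--     return ans
-- ===== Notes on version B (the rewrite author's own statement) =====
-- stated objective: faster
-- what changed: Instead of re-scanning the whole list for the first argmin and rebuilding it on every removal, B sorts the indices once by (value, index) -- which is exactly A's removal order -- and processes them with a sorted list of remaining indices, locating each removal position by binary search and popping it.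
import Mathlib
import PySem

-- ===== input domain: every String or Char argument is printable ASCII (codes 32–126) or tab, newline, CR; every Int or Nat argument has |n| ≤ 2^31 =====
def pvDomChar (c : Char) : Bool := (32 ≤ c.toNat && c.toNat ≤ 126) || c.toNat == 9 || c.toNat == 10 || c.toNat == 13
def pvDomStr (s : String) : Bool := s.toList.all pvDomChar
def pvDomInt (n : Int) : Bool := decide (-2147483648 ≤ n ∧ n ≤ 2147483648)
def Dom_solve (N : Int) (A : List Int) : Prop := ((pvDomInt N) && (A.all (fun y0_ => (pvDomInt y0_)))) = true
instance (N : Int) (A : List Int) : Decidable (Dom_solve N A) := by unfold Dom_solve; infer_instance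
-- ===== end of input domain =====

-- B replaces A's per-step full argmin rescan + list rebuild by one sort of the indices
-- by (value, index) (A's removal order) plus a binary search into the sorted list of
-- remaining indices; objective: faster (constant-factor, measured).

-- ===== PORT A =====

-- x = min(L, key=lambda n: A[n]): Python's min keeps the FIRST element whose key is
-- strictly smaller than the current best's key.
def argminLoop (A : List Int) (best : Nat) (rest : List Nat) : Nat :=
  match rest with
  | [] => best
  | n :: t => if A.getD n 0 < A.getD best 0 then argminLoop A n t else argminLoop A best t

def firstArgmin (A : List Int) : Nat :=
  match List.range A.length with
  | [] => 0
  | b :: r => argminLoop A b r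

-- while A: … A = A[:x] + A[x+1:]
def solveLoopF : Nat → List Int → Int → Int
  | _, [], ans => ans
  | 0, _ :: _, ans => ans            -- fuel guard only; never reached from solveLoop
  | fuel + 1, a :: t, ans =>
    let N := (a :: t).length
    let x := firstArgmin (a :: t)
    if x = 0 ∨ x = N - 1 then
      solveLoopF fuel ((a :: t).take x ++ (a :: t).drop (x + 1)) ans
    else
      solveLoopF fuel ((a :: t).take x ++ (a :: t).drop (x + 1))
        (ans + min ((N : Int) - x - 1) (x : Int))

def solveLoop (A : List Int) (ans : Int) : Int := solveLoopF A.length A ans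

def solve (N : Int) (A : List Int) : Int := solveLoop A 0

-- ===== PORT B =====

-- the hand-rolled bisect_left loop of Source B
def bisLoopF : Nat → List Nat → Nat → Nat → Nat → Nat
  | 0, _, _, lo, _ => lo             -- fuel guard only; never reached from bisLoop
  | fuel + 1, rem, i, lo, hi =>
    if lo < hi then
      let mid := (lo + hi) / 2
      if rem.getD mid 0 < i then bisLoopF fuel rem i (mid + 1) hi
      else bisLoopF fuel rem i lo mid
    else lo

def bisLoop (rem : List Nat) (i lo hi : Nat) : Nat := bisLoopF (hi - lo) rem i lo hi

-- key=lambda i: (A[i], i) — Python's lexicographic tuple comparison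
def lexLe (A : List Int) (i j : Nat) : Bool :=
  decide (A.getD i 0 < A.getD j 0) || ((A.getD i 0 == A.getD j 0) && decide (i ≤ j))

def bLoop (order : List Nat) (rem : List Nat) (ans : Int) : Int :=
  match order with
  | [] => ans
  | i :: t =>
    let pos := bisLoop rem i 0 rem.length
    bLoop t (rem.take pos ++ rem.drop (pos + 1))
      (ans + min (pos : Int) ((rem.length : Int) - 1 - pos))

def solve_alt (N : Int) (A : List Int) : Int :=
  bLoop ((List.range A.length).mergeSort (lexLe A)) (List.range A.length) 0

-- ===== PRECONDITION & SPEC =====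
def Spec_solve (N : Int) (A : List Int) (out : Int) : Prop := out = solve_alt N A
instance (N : Int) (A : List Int) (out : Int) : Decidable (Spec_solve N A out) := by unfold Spec_solve; infer_instance

-- ===== CLAIM (what is proved, stated in full; the proofs are below) =====
def Claim_equal_solve : Prop := ∀ (N : Int) (A : List Int), Dom_solve N A → Spec_solve N A (solve N A)

-- ===== LEMMAS AND PROOFS =====

theorem argminLoop_mem (A : List Int) (rest : List Nat) (best : Nat) :
    argminLoop A best rest = best ∨ argminLoop A best rest ∈ rest := by
  induction rest generalizing best with
  | nil => left; rfl
  | cons n t ih =>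
    unfold argminLoop
    by_cases h : A.getD n 0 < A.getD best 0
    · simp only [h, if_pos]
      rcases ih n with h' | h'
      · right; simp [h']
      · right; simp [h']
    · simp only [h, if_neg, not_false_iff]
      rcases ih best with h' | h'
      · left; exact h'
      · right; simp [h']

theorem firstArgmin_lt (A : List Int) (h : A ≠ []) : firstArgmin A < A.length := by
  unfold firstArgmin
  rcases hn : List.range A.length with _ | ⟨b, r⟩
  · have : A.length = 0 := by
      by_contra hne
      have := List.range_eq_nil.mp hn
      omega
    simp [List.length_eq_zero_iff] at this
    exact absurd this h
  · have hmem : argminLoop A b r ∈ b :: r := by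
      rcases argminLoop_mem A r b with h' | h'
      · simp [h']
      · simp [h']
    have : argminLoop A b r ∈ List.range A.length := by rw [hn]; exact hmem
    exact List.mem_range.mp this

-- strict lexicographic order on (g i, i)
def LexLt (g : Nat → Int) (i j : Nat) : Prop := g i < g j ∨ (g i = g j ∧ i < j)

theorem argminLoop_spec (A : List Int) (rest : List Nat) : ∀ (best : Nat),
    (∀ n ∈ rest, best < n) → rest.Pairwise (· < ·) →
    (argminLoop A best rest = best ∨ argminLoop A best rest ∈ rest) ∧
    (A.getD (argminLoop A best rest) 0 ≤ A.getD best 0 ∧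
      ∀ n ∈ rest, A.getD (argminLoop A best rest) 0 ≤ A.getD n 0) ∧
    (∀ n ∈ best :: rest, n < argminLoop A best rest →
      A.getD (argminLoop A best rest) 0 < A.getD n 0) := by
  induction rest with
  | nil =>
    intro best _ _
    refine ⟨Or.inl rfl, ⟨le_refl _, by simp⟩, ?_⟩
    simp only [argminLoop, List.mem_singleton]
    rintro n rfl hn
    omega
  | cons n t ih =>
    intro best hgt hp
    have hpt : t.Pairwise (· < ·) := (List.pairwise_cons.mp hp).2
    have hnt : ∀ m ∈ t, n < m := (List.pairwise_cons.mp hp).1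
    by_cases h : A.getD n 0 < A.getD best 0
    · have heq : argminLoop A best (n :: t) = argminLoop A n t := by
        simp only [argminLoop]; rw [if_pos h]
      obtain ⟨hm, ⟨hle, hall⟩, hfirst⟩ := ih n hnt hpt
      rw [heq]
      refine ⟨?_, ⟨?_, ?_⟩, ?_⟩
      · right
        rcases hm with h' | h'
        · simp [h']
        · simp [h']
      · exact le_of_lt (lt_of_le_of_lt hle h)
      · intro m hm'
        rcases List.mem_cons.mp hm' with rfl | hm'
        · exact hle
        · exact hall _ hm'
      · intro m hm' hlt
        rcases List.mem_cons.mp hm' with rfl | hm'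
        · exact lt_of_le_of_lt hle h
        · exact hfirst m hm' hlt
    · have heq : argminLoop A best (n :: t) = argminLoop A best t := by
        simp only [argminLoop]; rw [if_neg h]
      have hgtt : ∀ m ∈ t, best < m := fun m hm => hgt m (by simp [hm])
      obtain ⟨hm, ⟨hle, hall⟩, hfirst⟩ := ih best hgtt hpt
      rw [heq]
      have h' : A.getD best 0 ≤ A.getD n 0 := not_lt.mp h
      refine ⟨?_, ⟨hle, ?_⟩, ?_⟩
      · rcases hm with h'' | h''
        · exact Or.inl h''
        · right; simp [h'']
      · intro m hm'
        rcases List.mem_cons.mp hm' with rfl | hm'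
        · exact le_trans hle h'
        · exact hall _ hm'
      · intro m hm' hlt
        rcases List.mem_cons.mp hm' with rfl | hm'
        · exact hfirst m (by simp) hlt
        · rcases List.mem_cons.mp hm' with rfl | hm''
          · -- m = n : result > n means result ∈ t hence ≠ best, so A[res] < A[best] ≤ A[n]
            have hres : argminLoop A best t ∈ t := by
              rcases hm with h'' | h''
              · exfalso; rw [h''] at hlt; exact absurd hlt (by have := hgt m (by simp); omega)
              · exact h''
            have hbl : best < argminLoop A best t := hgtt _ hres
            exact lt_of_lt_of_le (hfirst best (by simp) hbl) h'
          · exact hfirst m (by simp [hm'']) hlt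


theorem firstArgmin_spec (A : List Int) (h : A ≠ []) :
    (∀ j < A.length, A.getD (firstArgmin A) 0 ≤ A.getD j 0) ∧
    (∀ j < firstArgmin A, A.getD (firstArgmin A) 0 < A.getD j 0) := by
  obtain ⟨m, hm⟩ : ∃ m, A.length = m + 1 := by
    cases A with
    | nil => exact absurd rfl h
    | cons a t => exact ⟨t.length, by simp⟩
  have hlen := firstArgmin_lt A h
  have hx : firstArgmin A = argminLoop A 0 ((List.range m).map Nat.succ) := by
    unfold firstArgmin
    rw [show List.range A.length = 0 :: (List.range m).map Nat.succ by
      rw [hm]; exact List.range_succ_eq_map]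
  have hgt : ∀ n ∈ (List.range m).map Nat.succ, 0 < n := by
    intro n hn
    simp only [List.mem_map] at hn
    obtain ⟨k, _, rfl⟩ := hn
    omega
  have hp : ((List.range m).map Nat.succ).Pairwise (· < ·) :=
    (List.pairwise_lt_range).map _ (fun _ _ hab => by omega)
  obtain ⟨_, ⟨hle0, hall⟩, hfirst⟩ := argminLoop_spec A ((List.range m).map Nat.succ) 0 hgt hp
  have hlen' : argminLoop A 0 ((List.range m).map Nat.succ) < A.length := hx ▸ hlen
  rw [hx]
  constructor
  · intro j hj
    rcases Nat.eq_zero_or_pos j with rfl | hjpos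
    · exact hle0
    · apply hall
      simp only [List.mem_map, List.mem_range]
      exact ⟨j - 1, by omega, by omega⟩
  · intro j hj
    apply hfirst
    · rcases Nat.eq_zero_or_pos j with rfl | hjpos
      · exact List.mem_cons_self
      · have : j < A.length := lt_trans hj hlen'
        exact List.mem_cons_of_mem _
          (List.mem_map.mpr ⟨j - 1, List.mem_range.mpr (by omega), by omega⟩)
    · exact hj


theorem sorted_getD_lt_iff (rem : List Nat) (hp : rem.Pairwise (· < ·))
    (m k : Nat) (hm : m < rem.length) (hk : k < rem.length) :
    (rem.getD m 0 < rem.getD k 0 ↔ m < k) := by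
  rw [rem.getD_eq_getElem 0 hm, rem.getD_eq_getElem 0 hk]
  have hmono := List.pairwise_iff_getElem.mp hp
  constructor
  · intro hlt
    by_contra hle
    rcases Nat.lt_or_ge k m with hkm | hkm
    · exact absurd (hmono k m hk hm hkm) (by omega)
    · have : m = k := by omega
      subst this
      omega
  · intro hmk
    exact hmono m k hm hk hmk


theorem bisLoop_eq (rem : List Nat) (hp : rem.Pairwise (· < ·)) (k : Nat)
    (hk : k < rem.length) :
    ∀ fuel lo hi, hi - lo ≤ fuel → lo ≤ k → k ≤ hi → hi ≤ rem.length →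
      bisLoopF fuel rem (rem.getD k 0) lo hi = k := by
  intro fuel
  induction fuel with
  | zero =>
    intro lo hi h1 h2 h3 _
    simp only [bisLoopF]
    omega
  | succ f ih =>
    intro lo hi h1 h2 h3 h4
    simp only [bisLoopF]
    by_cases h : lo < hi
    · rw [if_pos h]
      by_cases hc : rem.getD ((lo + hi) / 2) 0 < rem.getD k 0
      · rw [if_pos hc]
        have hmk : (lo + hi) / 2 < k :=
          (sorted_getD_lt_iff rem hp _ k (by omega) hk).mp hc
        exact ih _ _ (by omega) (by omega) h3 h4
      · rw [if_neg hc]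
        have hmk : k ≤ (lo + hi) / 2 := by
          by_contra hkm
          exact hc ((sorted_getD_lt_iff rem hp _ k (by omega) hk).mpr (by omega))
        exact ih _ _ (by omega) h2 hmk (by omega)
    · rw [if_neg h]
      omega

theorem solveLoop_cons (a : Int) (t : List Int) (ans : Int) :
    solveLoop (a :: t) ans =
      (if firstArgmin (a :: t) = 0 ∨ firstArgmin (a :: t) = (a :: t).length - 1 then
        solveLoop ((a :: t).take (firstArgmin (a :: t)) ++
          (a :: t).drop (firstArgmin (a :: t) + 1)) ans
      else
        solveLoop ((a :: t).take (firstArgmin (a :: t)) ++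
          (a :: t).drop (firstArgmin (a :: t) + 1))
          (ans + min (((a :: t).length : Int) - firstArgmin (a :: t) - 1)
            (firstArgmin (a :: t) : Int))) := by
  have hx : firstArgmin (a :: t) < (a :: t).length := firstArgmin_lt _ (by simp)
  have hlen : ((a :: t).take (firstArgmin (a :: t)) ++
      (a :: t).drop (firstArgmin (a :: t) + 1)).length = t.length := by
    simp only [List.length_append, List.length_take, List.length_drop,
      List.length_cons] at *
    omega
  unfold solveLoop
  simp only [List.length_cons, solveLoopF]
  rw [hlen]

theorem coupling (g : Nat → Int) (ord : List Nat) :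
    ∀ (rem : List Nat) (ans : Int), rem.Pairwise (· < ·) → ord.Perm rem →
      ord.Pairwise (LexLt g) →
      solveLoop (rem.map g) ans = bLoop ord rem ans := by
  induction ord with
  | nil =>
    intro rem ans _ hperm _
    have hnil : rem = [] := by
      have := hperm.length_eq
      simpa [List.length_eq_zero_iff] using this.symm
    subst hnil
    simp [solveLoop, solveLoopF, bLoop]
  | cons i t ih =>
    intro rem ans hp hperm hlex
    have hi : i ∈ rem := hperm.mem_iff.mp (by simp)
    obtain ⟨k, hk, hik⟩ := List.getElem_of_mem hi
    have hminLt : ∀ j ∈ t, LexLt g i j := (List.pairwise_cons.mp hlex).1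
    have htp : t.Pairwise (LexLt g) := (List.pairwise_cons.mp hlex).2
    have hmem_rem : ∀ j ∈ rem, j = i ∨ LexLt g i j := by
      intro j hj
      rcases List.mem_cons.mp (hperm.mem_iff.mpr hj) with rfl | hjt
      · exact Or.inl rfl
      · exact Or.inr (hminLt j hjt)
    -- the binary search finds position k (the index of i in the sorted rem)
    have hpos : bisLoop rem i 0 rem.length = k := by
      unfold bisLoop
      have h := bisLoop_eq rem hp k hk (rem.length - 0) 0 rem.length le_rfl
        (by omega) (by omega) le_rfl
      rwa [rem.getD_eq_getElem 0 hk, hik] at h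
    -- A's argmin over the current values is also position k
    have hxk : firstArgmin (rem.map g) = k := by
      have hLne : rem.map g ≠ [] := by
        intro hemp
        have : rem = [] := by simpa using congrArg List.length hemp
        subst this; simp at hk
      obtain ⟨hall, hfirst⟩ := firstArgmin_spec (rem.map g) hLne
      have hxlt : firstArgmin (rem.map g) < rem.length := by
        have := firstArgmin_lt (rem.map g) hLne
        simpa using this
      set x := firstArgmin (rem.map g) with hxdef
      have hval : ∀ j (hj : j < rem.length), (rem.map g).getD j 0 = g rem[j] := by
        intro j hj
        rw [(rem.map g).getD_eq_getElem 0 (by simpa using hj), List.getElem_map]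
      have hgi_le : ∀ j (hj : j < rem.length), g i ≤ g rem[j] := by
        intro j hj
        rcases hmem_rem rem[j] (rem.getElem_mem hj) with hji | hlt
        · rw [hji]
        · rcases hlt with h' | ⟨h', _⟩
          · exact le_of_lt h'
          · exact le_of_eq h'
      have hgeq : g rem[x] = g i := by
        have h1 : (rem.map g).getD x 0 ≤ (rem.map g).getD k 0 :=
          hall k (by simpa using hk)
        rw [hval x hxlt, hval k hk, hik] at h1
        exact le_antisymm h1 (hgi_le x hxlt)
      rcases Nat.lt_trichotomy x k with hxlt' | heq | hklt
      · exfalso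
        have hmono := List.pairwise_iff_getElem.mp hp
        have hviq : rem[x] < i := hik ▸ hmono x k hxlt hk hxlt' 
        rcases hmem_rem rem[x] (rem.getElem_mem hxlt) with hji | hlt
        · omega
        · rcases hlt with h' | ⟨_, h'⟩
          · omega
          · omega
      · exact heq
      · exfalso
        have h2 := hfirst k hklt
        rw [hval x hxlt, hval k hk, hik] at h2
        omega
    -- both sides remove index k and add the same amount
    have hrw : rem = rem.take k ++ rem[k] :: rem.drop (k + 1) := by
      conv_lhs => rw [← rem.take_append_drop k]
      rw [← List.getElem_cons_drop hk]
    have hperm' : t.Perm (rem.take k ++ rem.drop (k + 1)) := by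
      have h1 : rem.Perm (rem[k] :: (rem.take k ++ rem.drop (k + 1))) := by
        conv_lhs => rw [hrw]
        exact List.perm_middle
      have h2 : (i :: t).Perm (i :: (rem.take k ++ rem.drop (k + 1))) := by
        have h1' : rem.Perm (i :: (rem.take k ++ rem.drop (k + 1))) := hik ▸ h1
        exact hperm.trans h1' 
      exact h2.cons_inv
    have hp' : (rem.take k ++ rem.drop (k + 1)).Pairwise (· < ·) := by
      rw [← List.eraseIdx_eq_take_drop_succ]
      exact hp.sublist (rem.eraseIdx_sublist k)
    have hmap : (rem.map g).take k ++ (rem.map g).drop (k + 1) =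
        (rem.take k ++ rem.drop (k + 1)).map g := by
      rw [List.map_append, List.map_take, List.map_drop]
    -- reduce both programs one step
    obtain ⟨r0, rt, hre⟩ : ∃ r0 rt, rem = r0 :: rt := by
      cases rem with
      | nil => simp at hk
      | cons r0 rt => exact ⟨r0, rt, rfl⟩
    have hstepB : bLoop (i :: t) rem ans =
        bLoop t (rem.take k ++ rem.drop (k + 1))
          (ans + min (k : Int) ((rem.length : Int) - 1 - k)) := by
      simp only [bLoop, hpos]
    have hIH := ih (rem.take k ++ rem.drop (k + 1))
      (ans + min (k : Int) ((rem.length : Int) - 1 - k)) hp' hperm' htp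
    rw [hstepB, ← hIH, ← hmap]
    subst hre
    simp only [List.map_cons] at hxk ⊢
    rw [solveLoop_cons, hxk]
    by_cases hcond : k = 0 ∨ k = (g r0 :: List.map g rt).length - 1
    · rw [if_pos hcond]
      have hzero : min (k : Int) (((r0 :: rt).length : Int) - 1 - k) = 0 := by
        simp only [List.length_cons, List.length_map] at hcond hk
        simp only [List.length_cons]
        rcases hcond with rfl | hc
        · omega
        · omega
      rw [hzero, add_zero]
    · rw [if_neg hcond]
      have hmin : min (((g r0 :: List.map g rt).length : Int) - k - 1) (k : Int) =
          min (k : Int) (((r0 :: rt).length : Int) - 1 - k) := by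
        simp only [List.length_cons, List.length_map]
        omega
      rw [hmin]

-- ===== VERDICT (by name: the statement is the Claim_ definition above) =====
theorem lexLe_trans (A : List Int) (a b c : Nat) :
    lexLe A a b = true → lexLe A b c = true → lexLe A a c = true := by
  simp only [lexLe, Bool.or_eq_true, Bool.and_eq_true, decide_eq_true_eq, beq_iff_eq]
  omega

theorem lexLe_total (A : List Int) (a b : Nat) :
    (lexLe A a b || lexLe A b a) = true := by
  simp only [lexLe, Bool.or_eq_true, Bool.and_eq_true, decide_eq_true_eq, beq_iff_eq]
  omega

theorem solve_spec : Claim_equal_solve := by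
  unfold Claim_equal_solve Spec_solve
  intro N A _
  show solveLoop A 0 = bLoop ((List.range A.length).mergeSort (lexLe A)) (List.range A.length) 0
  have hAeq : A = (List.range A.length).map (fun i => A.getD i 0) := by
    apply List.ext_getElem (by simp)
    intro j h1 h2
    simp only [List.getElem_map, List.getElem_range]
    rw [A.getD_eq_getElem 0 h1]
  have hperm : ((List.range A.length).mergeSort (lexLe A)).Perm (List.range A.length) :=
    List.mergeSort_perm _ _
  have hsort := List.pairwise_mergeSort (lexLe_trans A) (lexLe_total A) (List.range A.length)
  have hnodup : ((List.range A.length).mergeSort (lexLe A)).Nodup :=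
    hperm.symm.nodup (List.nodup_range)
  have hlex : ((List.range A.length).mergeSort (lexLe A)).Pairwise
      (LexLt (fun i => A.getD i 0)) := by
    refine (hsort.and hnodup).imp ?_
    rintro a b ⟨hle, hne⟩
    simp only [lexLe, Bool.or_eq_true, Bool.and_eq_true, decide_eq_true_eq,
      beq_iff_eq] at hle
    unfold LexLt
    rcases hle with h | ⟨he, hab⟩
    · exact Or.inl h
    · exact Or.inr ⟨he, by omega⟩
  have h := coupling (fun i => A.getD i 0) ((List.range A.length).mergeSort (lexLe A))
    (List.range A.length) 0 List.pairwise_lt_range hperm hlex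
  rw [← hAeq] at h
  exact h
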